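-- pv_equiv track=rewrite | github.com/foszinc-design/mcpguardian | guardian/validators/xlsx_validator.py | _normalize_sheet_selection
-- ===== SOURCE A (Python) =====
-- def _normalize_sheet_selection(raw_names: list[str], all_sheet_names: list[str]) -> set[str]:
--     if not raw_names:
--         return set()
--     selected: set[str] = set()
--     for raw in raw_names:
--         if raw in {"*", "ALL", "all"}:
--             selected.update(all_sheet_names)
--         elif raw in all_sheet_names:
--             selected.add(raw)
--         else:
--             raise ValueError(f"Unknown sheet in --analyzed-sheet: {raw}")
--     return selected
-- ===== SOURCE B (Python) =====
-- def _normalize_sheet_selection(raw_names: list[str], all_sheet_names: list[str]) -> set[str]: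
--     if not raw_names:
--         return set()
--     wild = ("*", "ALL", "all")
--     unknown = next((r for r in raw_names if r not in wild and r not in all_sheet_names), None)
--     if unknown is not None:
--         raise ValueError(f"Unknown sheet in --analyzed-sheet: {unknown}")
--     cut = next((i for i, r in enumerate(raw_names) if r in wild), None)
--     if cut is None:
--         return set(raw_names)
--     return set(raw_names[:cut] + list(all_sheet_names))
-- ===== Notes on version B (the rewrite author's own statement) =====
-- stated objective: simpler
-- what changed: Instead of A's per-element accumulate-or-raise loop building a set incrementally, B scans once for the first unknown name (raising there), finds the index of the first wildcard, and returns a closed-form set: set(raw_names) if no wildcard, else set(names before the first wildcard + all sheet names).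
import Mathlib
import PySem

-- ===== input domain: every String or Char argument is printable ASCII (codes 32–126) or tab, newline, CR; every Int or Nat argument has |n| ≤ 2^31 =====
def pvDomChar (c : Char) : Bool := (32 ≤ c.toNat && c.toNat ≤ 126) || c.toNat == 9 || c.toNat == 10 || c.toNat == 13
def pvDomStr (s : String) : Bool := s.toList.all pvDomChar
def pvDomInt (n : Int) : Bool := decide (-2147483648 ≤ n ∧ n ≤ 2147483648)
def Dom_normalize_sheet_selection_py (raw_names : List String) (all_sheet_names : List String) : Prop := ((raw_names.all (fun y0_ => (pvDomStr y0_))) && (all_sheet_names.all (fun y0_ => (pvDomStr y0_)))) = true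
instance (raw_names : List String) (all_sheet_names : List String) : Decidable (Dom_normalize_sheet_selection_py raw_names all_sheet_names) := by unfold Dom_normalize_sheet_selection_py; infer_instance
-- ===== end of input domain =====

-- B replaces A's per-element accumulate-or-raise loop by a find-first-unknown scan plus a
-- closed-form result from the position of the first wildcard (simpler decomposition, same cost).

-- ===== PORT A =====
-- literal port of A: one loop over raw_names, each step updates the set, adds the name,
-- or raises (Option state, none = ValueError; Pre_ excludes the raise).
def normalize_sheet_selection_py (raw_names : List String) (all_sheet_names : List String) : List String :=
  if raw_names = [] then PySem.Set.empty
  else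
    (raw_names.foldl
      (fun (acc : Option (PySem.Set String)) raw =>
        acc.bind (fun selected =>
          if (PySem.Set.ofList ["*", "ALL", "all"]).contains raw then
            some (PySem.Set.update selected all_sheet_names)
          else if all_sheet_names.contains raw then
            some (PySem.Set.add selected raw)
          else
            none))
      (some PySem.Set.empty)).getD []

-- ===== PORT B =====
-- helper: port of next((i for i, r in enumerate(raw_names) if r in wild), None)
def pvFirstWildIdx : List String → Option Nat
  | [] => none
  | r :: t =>
    if (["*", "ALL", "all"] : List String).contains r then some 0
    else (pvFirstWildIdx t).map (· + 1)

-- literal port of B: find the first unknown name (ValueError, excluded by Pre_), then the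
-- index of the first wildcard, and return the closed-form set for that split.
def normalize_sheet_selection_py_alt (raw_names : List String) (all_sheet_names : List String) : List String :=
  if raw_names = [] then PySem.Set.empty
  else
    match raw_names.find? (fun r =>
        !((["*", "ALL", "all"] : List String).contains r) && !(all_sheet_names.contains r)) with
    | some _ => []  -- raise ValueError (outside Pre_)
    | none =>
      match pvFirstWildIdx raw_names with
      | none => PySem.Set.ofList raw_names
      | some cut => PySem.Set.ofList (raw_names.take cut ++ all_sheet_names)

-- ===== PRECONDITION & SPEC =====
-- exactly the inputs on which A returns: every raw name is a wildcard token or a known sheet name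
def Pre_normalize_sheet_selection_py (raw_names : List String) (all_sheet_names : List String) : Prop :=
  raw_names.all (fun raw => (["*", "ALL", "all"] : List String).contains raw || all_sheet_names.contains raw) = true
instance (raw_names : List String) (all_sheet_names : List String) : Decidable (Pre_normalize_sheet_selection_py raw_names all_sheet_names) := by unfold Pre_normalize_sheet_selection_py; infer_instance

def pvWitness_normalize_sheet_selection_py : List String × List String := (["*", "Sheet1"], ["Sheet1", "Sheet2"])

def Spec_normalize_sheet_selection_py (raw_names : List String) (all_sheet_names : List String) (out : List String) : Prop := out = normalize_sheet_selection_py_alt raw_names all_sheet_names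
instance (raw_names : List String) (all_sheet_names : List String) (out : List String) : Decidable (Spec_normalize_sheet_selection_py raw_names all_sheet_names out) := by unfold Spec_normalize_sheet_selection_py; infer_instance

-- ===== CLAIM (what is proved, stated in full; the proofs are below) =====
def Claim_equal_normalize_sheet_selection_py : Prop := ∀ (raw_names : List String) (all_sheet_names : List String), Dom_normalize_sheet_selection_py raw_names all_sheet_names → Pre_normalize_sheet_selection_py raw_names all_sheet_names → Spec_normalize_sheet_selection_py raw_names all_sheet_names (normalize_sheet_selection_py raw_names all_sheet_names)

-- ===== LEMMAS AND PROOFS =====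

-- expansion of the selection: a wildcard stands for all sheet names
def pvExp (all_sheet_names : List String) (raws : List String) : List String :=
  raws.flatMap (fun raw =>
    if (["*", "ALL", "all"] : List String).contains raw then all_sheet_names else [raw])

-- A's fold, on all-valid input, equals folding Set.add over the wildcard-expanded list
theorem pv_foldA (all_sheet_names : List String) (raws : List String) (s : PySem.Set String)
    (h : ∀ r ∈ raws, ((["*", "ALL", "all"] : List String).contains r || all_sheet_names.contains r) = true) :
    raws.foldl
      (fun (acc : Option (PySem.Set String)) raw =>
        acc.bind (fun selected =>
          if (PySem.Set.ofList ["*", "ALL", "all"]).contains raw then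
            some (PySem.Set.update selected all_sheet_names)
          else if all_sheet_names.contains raw then
            some (PySem.Set.add selected raw)
          else
            none))
      (some s)
    = some ((pvExp all_sheet_names raws).foldl PySem.Set.add s) := by
  have hc : ∀ x : String, (PySem.Set.ofList ["*", "ALL", "all"]).contains x
      = (["*", "ALL", "all"] : List String).contains x := fun _ => rfl
  induction raws generalizing s with
  | nil => simp [pvExp]
  | cons r t ih =>
    have hr := h r (List.mem_cons_self)
    have ht : ∀ x ∈ t, ((["*", "ALL", "all"] : List String).contains x || all_sheet_names.contains x) = true :=
      fun x hx => h x (List.mem_cons_of_mem _ hx)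
    simp only [hc] at ih ⊢
    by_cases hw : (["*", "ALL", "all"] : List String).contains r = true
    · rw [List.foldl_cons]
      simp only [Option.bind_some, hw, if_true]
      rw [ih _ ht]
      unfold pvExp
      rw [List.flatMap_cons, List.foldl_append, if_pos hw]
      rfl
    · have hwf : (["*", "ALL", "all"] : List String).contains r = false := by
        cases hx : (["*", "ALL", "all"] : List String).contains r
        · rfl
        · exact absurd hx hw
      have ha : all_sheet_names.contains r = true := by
        rw [hwf] at hr; simpa using hr
      rw [List.foldl_cons]
      simp only [Option.bind_some, hwf, Bool.false_eq_true, if_false, ha, if_true]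
      rw [ih _ ht]
      unfold pvExp
      rw [List.flatMap_cons, List.foldl_append, if_neg hw]
      rfl

-- adding elements already present is a no-op
theorem pv_mem_foldl_add (s : PySem.Set String) (l : List String) (x : String) (hx : x ∈ s) :
    x ∈ l.foldl PySem.Set.add s := by
  induction l generalizing s with
  | nil => exact hx
  | cons y t ih =>
    exact ih _ ((PySem.Set.mem_add _ _ _).mpr (Or.inl hx))

theorem pv_mem_foldl_add_of_mem (s : PySem.Set String) (l : List String) (x : String) (hx : x ∈ l) :
    x ∈ l.foldl PySem.Set.add s := by
  induction l generalizing s with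
  | nil => cases hx
  | cons y t ih =>
    rw [List.foldl_cons]
    rcases List.mem_cons.mp hx with h | h
    · exact pv_mem_foldl_add (PySem.Set.add s y) t x ((PySem.Set.mem_add _ _ _).mpr (Or.inr h))
    · exact ih _ h

theorem pv_foldl_add_subset (s : PySem.Set String) (l : List String)
    (h : ∀ x ∈ l, x ∈ s) : l.foldl PySem.Set.add s = s := by
  induction l with
  | nil => rfl
  | cons y t ih =>
    rw [List.foldl_cons, PySem.Set.add_of_mem (h y List.mem_cons_self)]
    exact ih (fun x hx => h x (List.mem_cons_of_mem _ hx))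

-- every element of the expansion of a valid selection is a sheet name
theorem pv_exp_subset (all_sheet_names : List String) (raws : List String)
    (h : ∀ r ∈ raws, ((["*", "ALL", "all"] : List String).contains r || all_sheet_names.contains r) = true) :
    ∀ x ∈ pvExp all_sheet_names raws, x ∈ all_sheet_names := by
  intro x hx
  rcases List.mem_flatMap.mp hx with ⟨r, hr, hxr⟩
  by_cases hw : (["*", "ALL", "all"] : List String).contains r = true
  · rw [if_pos hw] at hxr; exact hxr
  · rw [if_neg hw] at hxr
    have hv := h r hr
    have ha : all_sheet_names.contains r = true := by
      cases hcw : (["*", "ALL", "all"] : List String).contains r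
      · rw [hcw] at hv; simpa using hv
      · exact absurd hcw hw
    rcases List.mem_singleton.mp hxr with rfl
    simpa using ha

-- folding Set.add over the expansion equals B's closed form from the first wildcard index
theorem pv_fold_exp (all_sheet_names : List String) (raws : List String) (s : PySem.Set String)
    (h : ∀ r ∈ raws, ((["*", "ALL", "all"] : List String).contains r || all_sheet_names.contains r) = true) :
    (pvExp all_sheet_names raws).foldl PySem.Set.add s
    = match pvFirstWildIdx raws with
      | none => raws.foldl PySem.Set.add s
      | some cut => (raws.take cut ++ all_sheet_names).foldl PySem.Set.add s := by
  induction raws generalizing s with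
  | nil => rfl
  | cons r t ih =>
    have hr := h r (List.mem_cons_self)
    have ht : ∀ x ∈ t, ((["*", "ALL", "all"] : List String).contains x || all_sheet_names.contains x) = true :=
      fun x hx => h x (List.mem_cons_of_mem _ hx)
    by_cases hw : (["*", "ALL", "all"] : List String).contains r = true
    · -- first wildcard at 0: everything after contributes nothing new
      have hidx : pvFirstWildIdx (r :: t) = some 0 := by
        unfold pvFirstWildIdx; rw [if_pos hw]
      rw [hidx]
      unfold pvExp
      rw [List.flatMap_cons, if_pos hw, List.foldl_append]
      simp only [List.take_zero, List.nil_append]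
      exact pv_foldl_add_subset _ _ (fun x hx =>
        pv_mem_foldl_add_of_mem _ _ _ (pv_exp_subset all_sheet_names t ht x hx))
    · have ha : all_sheet_names.contains r = true := by
        cases hcw : (["*", "ALL", "all"] : List String).contains r
        · rw [hcw] at hr; simpa using hr
        · exact absurd hcw hw
      have hw3 : ¬r = "*" ∧ ¬r = "ALL" ∧ ¬r = "all" := by
        simpa [not_or] using hw
      have hidx : pvFirstWildIdx (r :: t) = (pvFirstWildIdx t).map (· + 1) := by
        simp [pvFirstWildIdx, hw3.1, hw3.2.1, hw3.2.2]
      have hhead : pvExp all_sheet_names (r :: t)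
          = r :: pvExp all_sheet_names t := by
        unfold pvExp; rw [List.flatMap_cons, if_neg hw]; rfl
      rw [hhead, hidx, List.foldl_cons, ih _ ht]
      cases hcase : pvFirstWildIdx t with
      | none => simp
      | some i =>
        simp only [Option.map_some]
        rw [List.take_succ_cons, List.cons_append, List.foldl_cons]

-- ===== VERDICT (by name: the statement is the Claim_ definition above) =====
theorem normalize_sheet_selection_py_spec : Claim_equal_normalize_sheet_selection_py := by
  intro raws alls _ hpre
  unfold Spec_normalize_sheet_selection_py normalize_sheet_selection_py normalize_sheet_selection_py_alt
  by_cases hnil : raws = []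
  · simp [hnil]
  · unfold Pre_normalize_sheet_selection_py at hpre
    rw [List.all_eq_true] at hpre
    have hfind : raws.find? (fun r =>
        !((["*", "ALL", "all"] : List String).contains r) && !(alls.contains r)) = none := by
      rw [List.find?_eq_none]
      intro r hr
      have hv := hpre r hr
      revert hv
      cases (["*", "ALL", "all"] : List String).contains r <;> cases alls.contains r <;> simp
    rw [if_neg hnil, if_neg hnil, hfind]
    rw [pv_foldA alls raws PySem.Set.empty hpre, Option.getD_some,
        pv_fold_exp alls raws PySem.Set.empty hpre]
    cases pvFirstWildIdx raws with
    | none => rfl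
    | some cut => rfl
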